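-- pv_equiv track=rewrite | github.com/petitBiscuits/TSM-AdvDaBa-ne04j | main.py | clean_csv_field
-- ===== SOURCE A (Python) =====
-- def clean_csv_field(text):
--     """Clean text field for safe CSV writing - very aggressive cleaning"""
--     if not text:
--         return ''
--
--     # Convert to string and strip whitespace
--     text = str(text).strip()
--
--     # Replace line breaks and carriage returns with spaces
--     text = text.replace('\n', ' ').replace('\r', ' ').replace('\t', ' ')
--
--     # Remove control characters
--     text = ''.join(char for char in text if ord(char) >= 32)
--
--     # Handle quotes very aggressively - double escape them for CSV
--     text = text.replace('"', '""')  # CSV standard: double quotes become double-double quotes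
--
--     # Remove any remaining problematic characters
--     text = text.replace('\x00', '')  # Remove null bytes
--     text = text.replace('\\', '/')  # Replace backslashes with forward slashes
--
--     # Limit length to prevent extremely long fields
--     if len(text) > 2000:
--         text = text[:1997] + "..."
--
--     return text
-- ===== SOURCE B (Python) =====
-- def clean_csv_field(text):
--     """Clean text field for safe CSV writing - one left-to-right pass."""
--     if not text:
--         return ''
--     parts = []
--     for char in str(text).strip():
--         if char in '\n\r\t':
--             parts.append(' ')
--         elif ord(char) < 32:
--             continue
--         elif char == '"':
--             parts.append('""')
--         elif char == '\\':
--             parts.append('/')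
--         else:
--             parts.append(char)
--     text = ''.join(parts)
--     if len(text) > 2000:
--         text = text[:1997] + "..."
--     return text
-- ===== Notes on version B (the rewrite author's own statement) =====
-- stated objective: alternative
-- what changed: Replaces A's chain of whole-string replace passes plus a filter comprehension with a single left-to-right pass that dispatches on each character and joins once.
import Mathlib
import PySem

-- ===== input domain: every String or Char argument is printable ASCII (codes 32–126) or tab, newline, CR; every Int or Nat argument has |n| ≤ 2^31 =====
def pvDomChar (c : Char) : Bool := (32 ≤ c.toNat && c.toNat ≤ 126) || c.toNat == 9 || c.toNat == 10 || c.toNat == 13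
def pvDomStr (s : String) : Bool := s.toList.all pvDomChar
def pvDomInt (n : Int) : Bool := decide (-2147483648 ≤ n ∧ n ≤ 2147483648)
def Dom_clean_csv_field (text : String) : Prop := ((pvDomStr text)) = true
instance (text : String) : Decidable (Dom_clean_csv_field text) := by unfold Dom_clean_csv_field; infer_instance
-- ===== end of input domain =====

-- B builds the cleaned field in one left-to-right pass over the stripped text (per-character dispatch
-- joined once) instead of A's chain of whole-string replace passes and a filter; objective: alternative.


-- ===== PORT A =====
-- literal transliteration of A: strip, three single-char replaces, control filter,
-- quote doubling, null removal, backslash replace, then the length cap.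
def clean_csv_field (text : String) : String :=
  if text = "" then "" else
  let t1 := PySem.Chars.strip text.toList
  let t2 := PySem.Chars.replace t1 ['\n'] [' ']
  let t3 := PySem.Chars.replace t2 ['\r'] [' ']
  let t4 := PySem.Chars.replace t3 ['\t'] [' ']
  let t5 := t4.filter (fun c => 32 ≤ c.toNat)
  let t6 := PySem.Chars.replace t5 ['"'] ['"', '"']
  let t7 := PySem.Chars.replace t6 ['\x00'] []
  let t8 := PySem.Chars.replace t7 ['\\'] ['/']
  let t9 := if 2000 < t8.length then t8.take 1997 ++ ['.', '.', '.'] else t8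
  String.mk t9

-- ===== PORT B =====
-- per-character dispatch of Source B's loop body: what gets appended for one character
def cleanChar (c : Char) : List Char :=
  if c = '\n' ∨ c = '\r' ∨ c = '\t' then [' ']
  else if c.toNat < 32 then []
  else if c = '"' then ['"', '"']
  else if c = '\\' then ['/']
  else [c]

def clean_csv_field_alt (text : String) : String :=
  if text = "" then "" else
  let cs := (PySem.Chars.strip text.toList).flatMap cleanChar   -- the loop + ''.join(parts)
  String.mk (if 2000 < cs.length then cs.take 1997 ++ ['.', '.', '.'] else cs)

-- ===== PRECONDITION & SPEC =====
def Spec_clean_csv_field (text : String) (out : String) : Prop := out = clean_csv_field_alt text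
instance (text : String) (out : String) : Decidable (Spec_clean_csv_field text out) := by unfold Spec_clean_csv_field; infer_instance

-- ===== CLAIM (what is proved, stated in full; the proofs are below) =====
def Claim_equal_clean_csv_field : Prop := ∀ (text : String), Dom_clean_csv_field text → Spec_clean_csv_field text (clean_csv_field text)

-- ===== LEMMAS AND PROOFS =====

-- replace with a single-character pattern acts character by character
theorem replace_go_single (a : Char) (new : List Char) :
    ∀ (l : List Char) (fuel : Nat) (acc : List Char), l.length ≤ fuel →
      PySem.Chars.replace.go [a] new fuel l acc
        = acc.reverse ++ l.flatMap (fun c => if c = a then new else [c]) := by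
  intro l
  induction l with
  | nil =>
    intro fuel acc _
    cases fuel <;> simp [PySem.Chars.replace.go]
  | cons c t ih =>
    intro fuel acc hlen
    cases fuel with
    | zero => simp at hlen
    | succ f =>
      have ht : t.length ≤ f := by simpa using hlen
      by_cases hc : c = a
      · have hpre : [a].isPrefixOf (c :: t) = true := by simp [hc, List.isPrefixOf]
        simp only [PySem.Chars.replace.go, hpre, if_pos, List.length_singleton,
          List.drop_succ_cons, List.drop_zero]
        rw [ih f (new.reverse ++ acc) ht]
        simp [hc]
      · have hpre : [a].isPrefixOf (c :: t) = false := by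
          simp only [List.isPrefixOf, Bool.and_eq_false_iff]
          exact Or.inl (by simpa using fun h => hc h.symm)
        simp only [PySem.Chars.replace.go, hpre, Bool.false_eq_true, if_false]
        rw [ih f (c :: acc) ht]
        simp [hc]

theorem replace_single (cs : List Char) (a : Char) (new : List Char) :
    PySem.Chars.replace cs [a] new = cs.flatMap (fun c => if c = a then new else [c]) := by
  simpa using replace_go_single a new cs cs.length [] le_rfl

theorem filter_eq_flatMap (l : List Char) (p : Char → Bool) :
    l.filter p = l.flatMap (fun c => if p c then [c] else []) := by
  induction l with
  | nil => rfl
  | cons a t ih => by_cases h : p a <;> simp [h, ih]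

theorem mem_strip {c : Char} {cs : List Char} (h : c ∈ PySem.Chars.strip cs) : c ∈ cs := by
  have h1 := (List.dropWhile_sublist (l := (List.dropWhile PySem.Chars.isspace cs).reverse)
      (p := PySem.Chars.isspace)).mem (by simpa [PySem.Chars.strip, PySem.Chars.rstrip,
        PySem.Chars.lstrip] using h)
  exact (List.dropWhile_sublist (p := PySem.Chars.isspace)).mem (by simpa using h1)

theorem char_eq_ofNat {c : Char} {n : Nat} (h : c.toNat = n) : c = Char.ofNat n := by
  have := Char.ofNat_toNat c
  rw [h] at this
  exact this.symm

theorem chain_eq_flatMap (cs : List Char) (hdom : ∀ c ∈ cs, pvDomChar c = true) :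
    PySem.Chars.replace (PySem.Chars.replace (PySem.Chars.replace
      ((PySem.Chars.replace (PySem.Chars.replace (PySem.Chars.replace cs ['\n'] [' '])
        ['\r'] [' ']) ['\t'] [' ']).filter (fun c => 32 ≤ c.toNat))
      ['"'] ['"', '"']) ['\x00'] []) ['\\'] ['/'] = cs.flatMap cleanChar := by
  rw [replace_single, replace_single, replace_single, replace_single, replace_single, replace_single,
      filter_eq_flatMap]
  rw [List.flatMap_assoc, List.flatMap_assoc, List.flatMap_assoc, List.flatMap_assoc, List.flatMap_assoc,
      List.flatMap_assoc]
  refine List.flatMap_congr (fun c hcmem => ?_)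
  have hc := hdom c hcmem
  simp only [pvDomChar, Bool.or_eq_true, Bool.and_eq_true, decide_eq_true_eq, beq_iff_eq] at hc
  rcases hc with ((⟨h32, _⟩ | h) | h) | h
  · have h1 : ¬ c = '\n' := fun h => absurd (h ▸ h32) (by decide)
    have h2 : ¬ c = '\r' := fun h => absurd (h ▸ h32) (by decide)
    have h3 : ¬ c = '\t' := fun h => absurd (h ▸ h32) (by decide)
    have hnull : ¬ c = '\x00' := fun h => absurd (h ▸ h32) (by decide)
    by_cases h4 : c = '"'
    · subst h4; decide
    by_cases h5 : c = '\\'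
    · subst h5; decide
    simp [cleanChar, h1, h2, h3, h4, h5, hnull, h32, Nat.not_lt.mpr h32]
  · rw [char_eq_ofNat h]; decide
  · rw [char_eq_ofNat h]; decide
  · rw [char_eq_ofNat h]; decide

-- ===== VERDICT (by name: the statement is the Claim_ definition above) =====
theorem clean_csv_field_spec : Claim_equal_clean_csv_field := by
  intro text hdom
  unfold Spec_clean_csv_field
  by_cases hempty : text = ""
  · simp [clean_csv_field, clean_csv_field_alt, hempty]
  · have hall : ∀ c ∈ text.toList, pvDomChar c = true := by
      simpa [Dom_clean_csv_field, pvDomStr, List.all_eq_true] using hdom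
    have hdom' : ∀ c ∈ PySem.Chars.strip text.toList, pvDomChar c = true :=
      fun c hc => hall c (mem_strip hc)
    simp only [clean_csv_field, clean_csv_field_alt, hempty, if_false]
    rw [chain_eq_flatMap _ hdom']
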